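-- pv_equiv track=rewrite | github.com/LOPES-HUFS/rust-lang-book-trans | translator.py | linemaker
-- ===== SOURCE A (Python) =====
-- def linemaker(lines):
--     fin = []
--     txt = ''
--     for line in lines:
--         if 65 < len(line) < 85:
--             txt += line
--         else:
--             txt += line
--             fin.append(txt)
--             txt = ''
--     return fin
-- ===== SOURCE B (Python) =====
-- def linemaker(lines):
--     lines = list(lines)
--     fin = []
--     start = 0
--     for i, line in enumerate(lines):
--         if not (65 < len(line) < 85):
--             fin.append(''.join(lines[start:i + 1]))
--             start = i + 1
--     return fin
-- ===== Notes on version B (the rewrite author's own statement) =====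
-- stated objective: alternative
-- what changed: A threads one accumulating string through a single fold; B recursively finds the first boundary line, joins the slice up to it into a block and recurses on the remainder.
import Mathlib
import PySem

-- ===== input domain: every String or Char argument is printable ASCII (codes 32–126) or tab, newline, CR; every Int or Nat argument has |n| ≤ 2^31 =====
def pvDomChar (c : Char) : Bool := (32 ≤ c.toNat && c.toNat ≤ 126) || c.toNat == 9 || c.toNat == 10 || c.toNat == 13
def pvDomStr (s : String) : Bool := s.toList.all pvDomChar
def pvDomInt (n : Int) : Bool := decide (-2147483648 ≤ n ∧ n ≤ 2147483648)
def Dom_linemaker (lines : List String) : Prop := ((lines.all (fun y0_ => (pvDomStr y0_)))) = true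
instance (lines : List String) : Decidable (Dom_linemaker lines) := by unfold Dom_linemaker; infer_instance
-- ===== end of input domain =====

-- B replaces A's single fold with an accumulating string by recursion that finds the first
-- boundary line, joins the slice up to it into one block and recurses on the rest (alternative decomposition).

-- ===== PORT A =====
-- one pass; state (fin, txt): txt accumulates, a boundary line flushes txt into fin
def linemaker (lines : List String) : List String :=
  (lines.foldl
    (fun (st : List String × String) line =>
      if 65 < PySem.Str.len line ∧ PySem.Str.len line < 85 then
        (st.1, st.2 ++ line)
      else
        (st.1 ++ [st.2 ++ line], ""))
    ([], "")).1

-- ===== PORT B =====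
-- loop body of Source B: skip a middle line; at a boundary append ''.join(lines[start:i+1]) and move start
def stepB (lines : List String) (st : List String × Int) (p : Int × String) : List String × Int :=
  if 65 < PySem.Str.len p.2 ∧ PySem.Str.len p.2 < 85 then st
  else (st.1 ++ [PySem.Str.join "" (PySem.List.slice lines (some st.2) (some (p.1 + 1)))], p.1 + 1)

def linemaker_alt (lines : List String) : List String :=
  ((PySem.List.enumerate lines 0).foldl (stepB lines) ([], 0)).1

-- ===== PRECONDITION & SPEC =====
def Spec_linemaker (lines : List String) (out : List String) : Prop := out = linemaker_alt lines
instance (lines : List String) (out : List String) : Decidable (Spec_linemaker lines out) := by unfold Spec_linemaker; infer_instance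

-- ===== CLAIM (what is proved, stated in full; the proofs are below) =====
def Claim_equal_linemaker : Prop := ∀ (lines : List String), Dom_linemaker lines → Spec_linemaker lines (linemaker lines)

-- ===== LEMMAS AND PROOFS =====

-- the block structure both programs compute, as a simple recursion
def go (txt : String) : List String → List String
  | [] => []
  | l :: ls =>
      if 65 < PySem.Str.len l ∧ PySem.Str.len l < 85 then go (txt ++ l) ls
      else (txt ++ l) :: go "" ls

theorem linemaker_foldl (ls : List String) (fin : List String) (txt : String) :
    (ls.foldl
      (fun (st : List String × String) line =>
        if 65 < PySem.Str.len line ∧ PySem.Str.len line < 85 then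
          (st.1, st.2 ++ line)
        else
          (st.1 ++ [st.2 ++ line], ""))
      (fin, txt)).1 = fin ++ go txt ls := by
  induction ls generalizing fin txt with
  | nil => simp [go]
  | cons l rest ih =>
      simp only [List.foldl_cons, go]
      split
      · exact ih fin (txt ++ l)
      · rw [ih]; simp

theorem linemaker_eq_go (lines : List String) : linemaker lines = go "" lines := by
  unfold linemaker
  rw [linemaker_foldl]
  simp

theorem join_empty_cons (a : String) (l : List String) :
    PySem.Str.join "" (a :: l) = a ++ PySem.Str.join "" l := by
  apply String.ext
  cases l with
  | nil =>
      simp [PySem.Str.toList_join, PySem.Chars.join, List.intercalate]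
  | cons b t =>
      simp [PySem.Str.toList_join, PySem.Chars.join_cons_cons]

theorem go_mids (b : String) (rest : List String) (hb : ¬ (65 < PySem.Str.len b ∧ PySem.Str.len b < 85))
    (ms : List String) (hm : ∀ m ∈ ms, 65 < PySem.Str.len m ∧ PySem.Str.len m < 85) :
    ∀ txt, go txt (ms ++ b :: rest) = (txt ++ PySem.Str.join "" (ms ++ [b])) :: go "" rest := by
  induction ms with
  | nil =>
      intro txt
      simp only [List.nil_append, go, if_neg hb]
      rw [show PySem.Str.join "" [b] = b from by
        apply String.ext; simp [PySem.Str.toList_join, PySem.Chars.join, List.intercalate]]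
  | cons m ms ih =>
      intro txt
      have hmem : 65 < PySem.Str.len m ∧ PySem.Str.len m < 85 := hm m (by simp)
      simp only [List.cons_append, go, if_pos hmem]
      rw [ih (fun x hx => hm x (by simp [hx]))]
      rw [join_empty_cons m (ms ++ [b])]
      simp [String.append_assoc]

theorem go_all_mid {ls : List String}
    (h : ∀ l ∈ ls, 65 < PySem.Str.len l ∧ PySem.Str.len l < 85) (txt : String) :
    go txt ls = [] := by
  induction ls generalizing txt with
  | nil => simp [go]
  | cons l rest ih =>
      simp only [go, if_pos (h l (by simp))]
      exact ih (fun x hx => h x (by simp [hx])) _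

theorem first_boundary_decomp (ls : List String) :
    (∀ l ∈ ls, 65 < PySem.Str.len l ∧ PySem.Str.len l < 85) ∨
    ∃ ms b rest, ls = ms ++ b :: rest ∧
      (∀ m ∈ ms, 65 < PySem.Str.len m ∧ PySem.Str.len m < 85) ∧
      ¬ (65 < PySem.Str.len b ∧ PySem.Str.len b < 85) := by
  induction ls with
  | nil => left; simp
  | cons l rest ih =>
      by_cases hl : 65 < PySem.Str.len l ∧ PySem.Str.len l < 85
      · rcases ih with hall | ⟨ms, b, r, hr, hm, hb⟩
        · left
          intro x hx
          rcases List.mem_cons.mp hx with h1 | h1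
          · exact h1 ▸ hl
          · exact hall x h1
        · right
          exact ⟨l :: ms, b, r, by simp [hr], by
            intro m hmem
            rcases List.mem_cons.mp hmem with h1 | h1
            · exact h1 ▸ hl
            · exact hm m h1, hb⟩
      · right
        exact ⟨[], l, rest, by simp, by simp, hl⟩

theorem stepB_skip (lines : List String) (ms : List String)
    (hm : ∀ m ∈ ms, 65 < PySem.Str.len m ∧ PySem.Str.len m < 85) :
    ∀ (s : Int) (st : List String × Int),
      (PySem.List.enumerate ms s).foldl (stepB lines) st = st := by
  induction ms with
  | nil => intro s st; simp [PySem.List.enumerate_nil]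
  | cons m ms ih =>
      intro s st
      rw [PySem.List.enumerate_cons, List.foldl_cons]
      rw [show stepB lines st (s, m) = st from by
        simp only [stepB, if_pos (hm m (by simp))]]
      exact ih (fun x hx => hm x (by simp [hx])) _ _

theorem foldl_stepB (lines : List String) (n : Nat) :
    ∀ (rest pre fin : List String), rest.length = n → lines = pre ++ rest →
      ((PySem.List.enumerate rest (pre.length : Int)).foldl (stepB lines)
        (fin, (pre.length : Int))).1 = fin ++ go "" rest := by
  induction n using Nat.strong_induction_on with
  | _ n ih =>
    intro rest pre fin hn hlines
    rcases first_boundary_decomp rest with hall | ⟨ms, b, rest', hr, hm, hb⟩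
    · rw [stepB_skip lines rest hall, go_all_mid hall]
      simp
    · subst hr
      rw [show PySem.List.enumerate (ms ++ b :: rest') (pre.length : Int)
            = PySem.List.enumerate ms (pre.length : Int)
              ++ ((pre.length : Int) + ms.length, b)
                :: PySem.List.enumerate rest' ((pre.length : Int) + ms.length + 1) from by
        rw [PySem.List.enumerate_append, PySem.List.enumerate_cons]]
      rw [List.foldl_append, stepB_skip lines ms hm, List.foldl_cons]
      rw [show stepB lines (fin, (pre.length : Int)) ((pre.length : Int) + ms.length, b)
            = (fin ++ [PySem.Str.join "" (ms ++ [b])], (pre.length : Int) + ms.length + 1) from by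
        simp only [stepB, if_neg hb]
        rw [show PySem.List.slice lines (some (pre.length : Int))
              (some ((pre.length : Int) + ms.length + 1)) = ms ++ [b] from by
          rw [show ((pre.length : Int) + ms.length + 1)
                = ((pre.length + ms.length + 1 : Nat) : Int) from by push_cast; ring,
              PySem.List.slice_natCast, hlines, List.drop_left,
              show pre.length + ms.length + 1 - pre.length = ms.length + 1 from by omega,
              List.take_append]
          simp]]
      have hcast : ((pre.length : Int) + ms.length + 1)
          = (((pre ++ (ms ++ [b])).length : Nat) : Int) := by simp; ring
      rw [hcast]
      have hlt : rest'.length < n := by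
        simp only [List.length_append, List.length_cons] at hn; omega
      rw [ih rest'.length hlt rest' (pre ++ (ms ++ [b])) (fin ++ [PySem.Str.join "" (ms ++ [b])])
            rfl (by simp [hlines])]
      rw [go_mids b rest' hb ms hm ""]
      have hhead : ("" : String) ++ PySem.Str.join "" (ms ++ [b]) = PySem.Str.join "" (ms ++ [b]) := by
        apply String.ext; simp
      rw [hhead]
      simp

theorem alt_eq_go (lines : List String) : linemaker_alt lines = go "" lines := by
  unfold linemaker_alt
  have := foldl_stepB lines lines.length lines [] [] rfl (by simp)
  simpa using this

-- ===== VERDICT (by name: the statement is the Claim_ definition above) =====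
theorem linemaker_spec : Claim_equal_linemaker := by
  intro lines _
  unfold Spec_linemaker
  rw [linemaker_eq_go, alt_eq_go]
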